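-- pv_equiv track=rewrite | github.com/HKU-BAL/ClairS | src/create_pair_tensor_pileup.py | heapq_merge_generator_from
-- ===== SOURCE A (Python) =====
-- import heapq
--
-- def heapq_merge_generator_from(normal_bam_pileup_generator, tumor_bam_pileup_generator, skip_if_normal_empty=True):
--     normal_candidates_set = set()
--     tumor_candidates_set = set()
--     for pos, is_tumor in heapq.merge(normal_bam_pileup_generator, tumor_bam_pileup_generator):
--         if is_tumor:
--             if pos in normal_candidates_set or not skip_if_normal_empty:
--                 yield pos
--                 normal_candidates_set.discard(pos)
--             else:
--                 continue
--         else: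
--             normal_candidates_set.add(pos)
--
--     for pos in tumor_candidates_set:
--         if pos in normal_candidates_set:
--             yield pos
-- ===== SOURCE B (Python) =====
-- def heapq_merge_generator_from(normal_bam_pileup_generator, tumor_bam_pileup_generator, skip_if_normal_empty=True):
--     # Different strategy: A streams the merged entries through a mutable candidate set
--     # (add on normal, discard on yield).  B instead uses the fact that membership of a
--     # position in that set is equivalent to "the nearest earlier entry at the same
--     # position is a normal entry", so it works in three staged passes: an explicit
--     # index-pointer merge, one pass building a previous-same-position flag table, and a
--     # final pass emitting tumor positions by that pure rule.
--     left = list(normal_bam_pileup_generator)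
--     right = list(tumor_bam_pileup_generator)
--     merged = []
--     i = j = 0
--     while i < len(left) and j < len(right):
--         if left[i] <= right[j]:
--             merged.append(left[i])
--             i += 1
--         else:
--             merged.append(right[j])
--             j += 1
--     merged.extend(left[i:])
--     merged.extend(right[j:])
--     prev_flag = []          # prev_flag[k]: is_tumor of the nearest earlier same-pos entry, or None
--     latest = {}
--     for pos, is_tumor in merged:
--         prev_flag.append(latest.get(pos))
--         latest[pos] = is_tumor
--     for (pos, is_tumor), pf in zip(merged, prev_flag):
--         if is_tumor and (not skip_if_normal_empty or pf is False):
--             yield pos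
-- ===== Notes on version B (the rewrite author's own statement) =====
-- stated objective: alternative
-- what changed: Replaces heapq.merge feeding a streaming scan that mutates a candidate set (add on normal, discard on yield, plus a dead trailing loop) with three staged passes: an explicit index-pointer merge, a pass building a previous-same-position flag table, and a final pass emitting each tumor position by the pure rule 'nearest earlier same-position entry is normal, or skipping disabled'.
import Mathlib
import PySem

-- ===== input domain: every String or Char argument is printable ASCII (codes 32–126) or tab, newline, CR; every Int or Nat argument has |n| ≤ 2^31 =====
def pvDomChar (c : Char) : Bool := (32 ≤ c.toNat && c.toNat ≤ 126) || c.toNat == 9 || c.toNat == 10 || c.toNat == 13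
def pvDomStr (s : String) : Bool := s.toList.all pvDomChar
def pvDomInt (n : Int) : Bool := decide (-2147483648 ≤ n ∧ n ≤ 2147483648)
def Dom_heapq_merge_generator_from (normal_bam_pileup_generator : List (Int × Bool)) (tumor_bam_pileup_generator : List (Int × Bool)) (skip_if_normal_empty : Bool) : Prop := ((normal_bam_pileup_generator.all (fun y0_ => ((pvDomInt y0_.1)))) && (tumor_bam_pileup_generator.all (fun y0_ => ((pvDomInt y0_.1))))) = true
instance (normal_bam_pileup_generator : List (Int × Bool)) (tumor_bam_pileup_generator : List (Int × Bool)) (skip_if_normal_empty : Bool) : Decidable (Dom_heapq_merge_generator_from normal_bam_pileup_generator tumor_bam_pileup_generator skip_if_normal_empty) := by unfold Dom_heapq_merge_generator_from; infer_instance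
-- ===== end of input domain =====

-- B replaces A's streaming candidate-set scan by staged passes: index-pointer merge, a
-- previous-same-position flag table, then emission by a pure rule (objective: alternative).

-- ===== PORT A =====
-- comparison of (pos, is_tumor) tuples as Python compares them (bool as int), '<=' so the
-- left/normal side wins ties, as heapq.merge does
def pvTupLE (x y : Int × Bool) : Bool :=
  decide (x.1 < y.1) || (x.1 == y.1 && (!x.2 || y.2))

-- transliteration of heapq.merge on two iterables: repeatedly pop the smaller head (left on ties)
def pvMergeA : List (Int × Bool) → List (Int × Bool) → List (Int × Bool)
  | [], ys => ys
  | x :: xs, [] => x :: xs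
  | x :: xs, y :: ys =>
    if pvTupLE x y then x :: pvMergeA xs (y :: ys) else y :: pvMergeA (x :: xs) ys

-- the for-loop over the merged stream; returns (yielded positions, final normal_candidates_set)
def pvLoopA (skip : Bool) : List (Int × Bool) → PySem.Set Int → List Int × PySem.Set Int
  | [], s => ([], s)
  | (pos, is_tumor) :: rest, s =>
    if is_tumor then
      if PySem.Set.contains s pos || !skip then
        let r := pvLoopA skip rest (PySem.Set.discard s pos)
        (pos :: r.1, r.2)
      else pvLoopA skip rest s
    else pvLoopA skip rest (PySem.Set.add s pos)

def heapq_merge_generator_from (normal_bam_pileup_generator : List (Int × Bool)) (tumor_bam_pileup_generator : List (Int × Bool)) (skip_if_normal_empty : Bool) : List Int :=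
  let tumor_candidates_set : PySem.Set Int := PySem.Set.empty
  let r := pvLoopA skip_if_normal_empty (pvMergeA normal_bam_pileup_generator tumor_bam_pileup_generator) PySem.Set.empty
  -- trailing 'for pos in tumor_candidates_set' loop (tumor_candidates_set is never added to, so it is empty)
  r.1 ++ tumor_candidates_set.filter (fun pos => PySem.Set.contains r.2 pos)

-- ===== PORT B =====
-- Source B's 'left[i] <= right[j]': Python tuple comparison with bool compared as an int
def pvLeB (x y : Int × Bool) : Bool :=
  decide (x.1 < y.1) || (x.1 == y.1 && !(x.2 && !y.2))

-- the index-pointer while loop building 'merged', plus the two trailing extends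
def pvMergeIdx (left right : List (Int × Bool)) (i j : Nat) : List (Int × Bool) :=
  if h : i < left.length ∧ j < right.length then
    if pvLeB left[i] right[j] then left[i] :: pvMergeIdx left right (i + 1) j
    else right[j] :: pvMergeIdx left right i (j + 1)
  else left.drop i ++ right.drop j
termination_by (left.length - i) + (right.length - j)
decreasing_by all_goals omega

-- the 'prev_flag'/'latest' pass: for each entry, the flag of the nearest earlier same-pos entry
def pvPrevFlags : List (Int × Bool) → PySem.Dict Int Bool → List (Option Bool)
  | [], _ => []
  | (pos, is_tumor) :: rest, latest =>
    latest.get? pos :: pvPrevFlags rest (latest.insert pos is_tumor)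

def heapq_merge_generator_from_alt (normal_bam_pileup_generator : List (Int × Bool)) (tumor_bam_pileup_generator : List (Int × Bool)) (skip_if_normal_empty : Bool) : List Int :=
  let merged := pvMergeIdx normal_bam_pileup_generator tumor_bam_pileup_generator 0 0
  let prev_flag := pvPrevFlags merged PySem.Dict.empty
  (merged.zip prev_flag).filterMap
    (fun x => if x.1.2 && (!skip_if_normal_empty || x.2 == some false) then some x.1.1 else none)

-- ===== PRECONDITION & SPEC =====
def Spec_heapq_merge_generator_from (normal_bam_pileup_generator : List (Int × Bool)) (tumor_bam_pileup_generator : List (Int × Bool)) (skip_if_normal_empty : Bool) (out : List Int) : Prop := out = heapq_merge_generator_from_alt normal_bam_pileup_generator tumor_bam_pileup_generator skip_if_normal_empty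
instance (normal_bam_pileup_generator : List (Int × Bool)) (tumor_bam_pileup_generator : List (Int × Bool)) (skip_if_normal_empty : Bool) (out : List Int) : Decidable (Spec_heapq_merge_generator_from normal_bam_pileup_generator tumor_bam_pileup_generator skip_if_normal_empty out) := by unfold Spec_heapq_merge_generator_from; infer_instance

-- ===== CLAIM (what is proved, stated in full; the proofs are below) =====
def Claim_equal_heapq_merge_generator_from : Prop := ∀ (normal_bam_pileup_generator : List (Int × Bool)) (tumor_bam_pileup_generator : List (Int × Bool)) (skip_if_normal_empty : Bool), Dom_heapq_merge_generator_from normal_bam_pileup_generator tumor_bam_pileup_generator skip_if_normal_empty → Spec_heapq_merge_generator_from normal_bam_pileup_generator tumor_bam_pileup_generator skip_if_normal_empty (heapq_merge_generator_from normal_bam_pileup_generator tumor_bam_pileup_generator skip_if_normal_empty)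

-- ===== LEMMAS AND PROOFS =====
-- the two ports spell the tuple comparison differently; they agree
lemma pvLeB_eq_pvTupLE (x y : Int × Bool) : pvLeB x y = pvTupLE x y := by
  cases x with | mk a b => cases y with | mk c d =>
  cases b <;> cases d <;> simp [pvLeB, pvTupLE]

-- B's index-pointer merge is A's heapq.merge on the remaining suffixes
lemma mergeIdx_eq_mergeA (left right : List (Int × Bool)) (i j : Nat) :
    pvMergeIdx left right i j = pvMergeA (left.drop i) (right.drop j) := by
  fun_induction pvMergeIdx left right i j with
  | case1 i j h hle ih =>
    rw [pvLeB_eq_pvTupLE] at hle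
    rw [← List.getElem_cons_drop (as := left) h.1,
        ← List.getElem_cons_drop (as := right) h.2]
    simp only [pvMergeA]
    rw [if_pos hle, ih, List.getElem_cons_drop]
  | case2 i j h hle ih =>
    rw [pvLeB_eq_pvTupLE] at hle
    rw [← List.getElem_cons_drop (as := left) h.1,
        ← List.getElem_cons_drop (as := right) h.2]
    simp only [pvMergeA]
    rw [if_neg hle, ih, List.getElem_cons_drop]
  | case3 i j h =>
    rcases Nat.lt_or_ge i left.length with hi | hi
    · have hj : right.length ≤ j := by omega
      rw [List.drop_of_length_le hj, List.append_nil]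
      cases left.drop i with
      | nil => simp [pvMergeA]
      | cons x xs => simp [pvMergeA]
    · rw [List.drop_of_length_le hi, List.nil_append]
      cases right.drop j with
      | nil => simp [pvMergeA]
      | cons y ys => simp [pvMergeA]

-- the heart of the equivalence: membership of a position in A's candidate set equals
-- "the latest entry recorded at that position is a normal one"
lemma loopA_eq_rule (skip : Bool) :
    ∀ (M : List (Int × Bool)) (s : PySem.Set Int) (d : PySem.Dict Int Bool),
      (∀ q : Int, q ∈ s ↔ d.get? q = some false) →
      (pvLoopA skip M s).1 =
        (M.zip (pvPrevFlags M d)).filterMap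
          (fun x => if x.1.2 && (!skip || x.2 == some false) then some x.1.1 else none) := by
  intro M
  induction M with
  | nil => intro s d _; simp [pvLoopA, pvPrevFlags]
  | cons hd rest ih =>
    intro s d hinv
    obtain ⟨p, t⟩ := hd
    have hc : PySem.Set.contains s p = (d.get? p == some false) := by
      by_cases hm : p ∈ s
      · rw [(PySem.Set.contains_iff s p).mpr hm, ((hinv p).mp hm)]; simp
      · have h1 : PySem.Set.contains s p = false := by
          cases hcp : PySem.Set.contains s p with
          | false => rfl
          | true => exact absurd ((PySem.Set.contains_iff s p).mp hcp) hm
        have h2 : (d.get? p == some false) = false :=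
          beq_eq_false_iff_ne.mpr (fun h => hm ((hinv p).mpr h))
        rw [h1, h2]
    simp only [pvPrevFlags, List.zip_cons_cons, List.filterMap_cons]
    cases t with
    | false =>
      -- normal entry: A adds p to the set, B records flag false for p
      have hinv' : ∀ q : Int, q ∈ PySem.Set.add s p ↔ (d.insert p false).get? q = some false := by
        intro q
        by_cases hq : q = p
        · subst hq; simp [PySem.Set.mem_add, PySem.Dict.get?_insert_self]
        · rw [PySem.Dict.get?_insert_of_ne _ _ hq]
          simp only [PySem.Set.mem_add, hq, or_false]
          exact hinv q
      have hA : pvLoopA skip ((p, false) :: rest) s = pvLoopA skip rest (PySem.Set.add s p) := by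
        simp [pvLoopA]
      rw [hA, ih (PySem.Set.add s p) (d.insert p false) hinv']
      simp
    | true =>
      cases he : (PySem.Set.contains s p || !skip) with
      | true =>
        -- tumor entry emitted: A discards p, B records flag true for p
        have hinv' : ∀ q : Int, q ∈ PySem.Set.discard s p ↔ (d.insert p true).get? q = some false := by
          intro q
          by_cases hq : q = p
          · subst hq; simp [PySem.Set.mem_discard, PySem.Dict.get?_insert_self]
          · rw [PySem.Dict.get?_insert_of_ne _ _ hq]
            simp only [PySem.Set.mem_discard, hq, ne_eq, not_false_iff, and_true]
            exact hinv q
        have he' : (true && (!skip || d.get? p == some false)) = true := by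
          rw [← hc]; cases b : PySem.Set.contains s p <;> cases skip <;> simp_all
        have hA : (pvLoopA skip ((p, true) :: rest) s).1
            = p :: (pvLoopA skip rest (PySem.Set.discard s p)).1 := by
          simp only [pvLoopA, he]; simp
        rw [hA, he', ih (PySem.Set.discard s p) (d.insert p true) hinv']
        simp
      | false =>
        -- tumor entry skipped: p is not in the set, so the latest flag at p is not 'normal';
        -- A keeps the set, B still records flag true for p — consistent because p ∉ s
        have hps : p ∉ s := by
          intro hm
          rw [(PySem.Set.contains_iff s p).mpr hm] at he
          simp at he
        have hinv' : ∀ q : Int, q ∈ s ↔ (d.insert p true).get? q = some false := by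
          intro q
          by_cases hq : q = p
          · subst hq; simp [PySem.Dict.get?_insert_self, hps]
          · rw [PySem.Dict.get?_insert_of_ne _ _ hq]; exact hinv q
        have he' : (true && (!skip || d.get? p == some false)) = false := by
          rw [← hc]; cases b : PySem.Set.contains s p <;> cases skip <;> simp_all
        have hA : pvLoopA skip ((p, true) :: rest) s = pvLoopA skip rest s := by
          simp only [pvLoopA, he]; simp
        rw [hA, he', ih s (d.insert p true) hinv']
        simp

-- ===== VERDICT (by name: the statement is the Claim_ definition above) =====
theorem heapq_merge_generator_from_spec : Claim_equal_heapq_merge_generator_from := by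
  intro n t skip _
  unfold Spec_heapq_merge_generator_from heapq_merge_generator_from heapq_merge_generator_from_alt
  rw [mergeIdx_eq_mergeA]
  simp only [List.drop_zero]
  rw [← loopA_eq_rule skip _ PySem.Set.empty PySem.Dict.empty
        (by intro q; simp [PySem.Set.empty, PySem.Dict.get?_empty])]
  simp [PySem.Set.empty]
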